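-- pv_equiv track=rewrite | github.com/mylo-james/MyloWare | apps/orchestrator/run_observer.py | format_status_summary
-- ===== SOURCE A (Python) =====
-- from typing import Any, Callable, Mapping, Sequence, cast
--
-- def format_status_summary(videos: list[Mapping[str, Any]]) -> str:
--     if not videos:
--         return "no clips recorded yet"
--     stats: dict[str, int] = {}
--     for video in videos:
--         status = str(video.get("status") or "pending").lower()
--         stats[status] = stats.get(status, 0) + 1
--     return ", ".join(f"{status}: {count}" for status, count in sorted(stats.items()))
-- ===== SOURCE B (Python) =====
-- def format_status_summary(videos):
--     if not videos:
--         return "no clips recorded yet"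
--     statuses = sorted(str(v.get("status") or "pending").lower() for v in videos)
--     parts = []
--     run = statuses[0]
--     count = 0
--     for s in statuses:
--         if s == run:
--             count += 1
--         else:
--             parts.append(f"{run}: {count}")
--             run = s
--             count = 1
--     parts.append(f"{run}: {count}")
--     return ", ".join(parts)
-- ===== Notes on version B (the rewrite author's own statement) =====
-- stated objective: alternative
-- what changed: Replaces hash-counting (dict accumulator, then sorted items) with sort-then-group: sort the full list of normalized statuses and run-length-scan the contiguous runs to emit 'status: count' parts.
import Mathlib
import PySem

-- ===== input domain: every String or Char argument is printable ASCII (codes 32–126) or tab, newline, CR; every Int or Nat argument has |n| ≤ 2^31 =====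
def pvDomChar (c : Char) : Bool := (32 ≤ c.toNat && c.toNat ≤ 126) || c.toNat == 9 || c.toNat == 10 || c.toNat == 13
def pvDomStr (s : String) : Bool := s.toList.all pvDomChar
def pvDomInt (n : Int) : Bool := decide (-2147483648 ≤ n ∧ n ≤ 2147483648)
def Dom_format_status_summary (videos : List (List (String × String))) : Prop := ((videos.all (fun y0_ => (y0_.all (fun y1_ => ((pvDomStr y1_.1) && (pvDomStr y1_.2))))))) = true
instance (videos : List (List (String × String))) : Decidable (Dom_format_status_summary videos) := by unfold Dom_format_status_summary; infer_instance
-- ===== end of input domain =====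

-- B replaces A's dict-accumulator counting with sort-then-group: sort the normalized statuses and run-length-scan contiguous runs; same output.


-- ===== PORT A =====
-- str(video.get("status") or "pending").lower(): get? "status"; 'or' replaces none / "" (the falsy values here) by "pending";
-- str() on a string is the identity. Exact on these string-valued dicts.
def pvNorm (video : List (String × String)) : String :=
  PySem.Str.lower
    (match (PySem.Dict.ofList video).get? "status" with
     | none => "pending"
     | some s => if s = "" then "pending" else s)

def format_status_summary (videos : List (List (String × String))) : String :=
  if videos = [] then "no clips recorded yet"
  else
    let stats := videos.foldl
      (fun d video =>
        let status := pvNorm video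
        d.insert status (d.getD status 0 + 1))
      PySem.Dict.empty
    -- sorted(stats.items()) compares (status, count) tuples: sorted2 with the two components
    PySem.Str.join ", "
      ((PySem.List.sorted2 stats.items Prod.fst Prod.snd).map
        (fun p => p.1 ++ ": " ++ PySem.Int.toStr p.2))

-- ===== PORT B =====
-- the run-length scan loop body of Source B
def pvStep (st : List String × String × Int) (s : String) : List String × String × Int :=
  if s = st.2.1 then (st.1, st.2.1, st.2.2 + 1)
  else (st.1 ++ [st.2.1 ++ ": " ++ PySem.Int.toStr st.2.2], s, 1)

def format_status_summary_alt (videos : List (List (String × String))) : String :=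
  if videos = [] then "no clips recorded yet"
  else
    let statuses := PySem.List.sorted (videos.map pvNorm) (fun x => x)
    -- statuses[0]: videos ≠ [] so statuses is nonempty; the [] branch is unreachable
    match statuses with
    | [] => ""
    | s0 :: _ =>
      let fin := statuses.foldl pvStep ([], s0, 0)
      PySem.Str.join ", " (fin.1 ++ [fin.2.1 ++ ": " ++ PySem.Int.toStr fin.2.2])

-- ===== PRECONDITION & SPEC =====
def Spec_format_status_summary (videos : List (List (String × String))) (out : String) : Prop := out = format_status_summary_alt videos
instance (videos : List (List (String × String))) (out : String) : Decidable (Spec_format_status_summary videos out) := by unfold Spec_format_status_summary; infer_instance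

-- ===== CLAIM (what is proved, stated in full; the proofs are below) =====
def Claim_equal_format_status_summary : Prop := ∀ (videos : List (List (String × String))), Dom_format_status_summary videos → Spec_format_status_summary videos (format_status_summary videos)

-- ===== LEMMAS AND PROOFS =====

-- insertBy with two predicates that agree between the inserted element and the accumulator's elements
theorem pv_insertBy_congr {α : Type} (p q : α → α → Bool) (x : α) (acc : List α)
    (h : ∀ b ∈ acc, p x b = q x b) :
    PySem.List.insertBy p x acc = PySem.List.insertBy q x acc := by
  induction acc with
  | nil => rfl
  | cons y ys ih =>
    simp only [PySem.List.insertBy]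
    rw [h y (by simp)]
    split
    · rfl
    · rw [ih (fun b hb => h b (by simp [hb]))]

-- the insertion-sort fold is unchanged if the predicates agree on the inputs
theorem pv_foldl_insertBy_congr {α : Type} (p q : α → α → Bool) (xs : List α)
    (h : ∀ a ∈ xs, ∀ b ∈ xs, p a b = q a b) : ∀ (acc : List α),
    (∀ a ∈ xs, ∀ b ∈ acc, p a b = q a b) →
    xs.foldl (fun acc x => PySem.List.insertBy p x acc) acc
      = xs.foldl (fun acc x => PySem.List.insertBy q x acc) acc := by
  induction xs with
  | nil => intro acc _; rfl
  | cons x t ih =>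
    intro acc hacc
    simp only [List.foldl_cons]
    rw [pv_insertBy_congr p q x acc (fun b hb => hacc x (by simp) b hb)]
    exact ih (fun a ha b hb => h a (by simp [ha]) b (by simp [hb]))
      (PySem.List.insertBy q x acc)
      (fun a ha b hb => by
        rcases (PySem.List.mem_insertBy q x b acc).1 hb with hbx | hbacc
        · exact hbx ▸ h a (by simp [ha]) x (by simp)
        · exact hacc a (by simp [ha]) b hbacc)

-- on a list of pairs whose first components determine the second, tuple-sorting is key-sorting by fst
theorem pv_sorted2_eq_sorted_fst (xs : List (String × Int))
    (h : ∀ a ∈ xs, ∀ b ∈ xs, a.1 = b.1 → a.2 = b.2) :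
    PySem.List.sorted2 xs Prod.fst Prod.snd = PySem.List.sorted xs Prod.fst := by
  show xs.foldl (fun acc x => PySem.List.insertBy
      (fun a b => decide (a.1 < b.1) || (!decide (b.1 < a.1) && decide (a.2 < b.2))) x acc) []
    = xs.foldl (fun acc x => PySem.List.insertBy (fun a b => decide (a.1 < b.1)) x acc) []
  refine pv_foldl_insertBy_congr _ _ xs ?_ [] (by intro a _ b hb; cases hb)
  intro a ha b hb
  rcases lt_trichotomy a.1 b.1 with hlt | heq | hgt
  · simp [hlt]
  · have h2 : a.2 = b.2 := h a ha b hb heq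
    simp [heq, h2]
  · simp [hgt, not_lt_of_gt hgt]

-- sorting the counter's items by key is mapping over the sorted distinct statuses
theorem pv_sorted_items (L : List String) :
    PySem.List.sorted2 (PySem.Dict.counter L).items Prod.fst Prod.snd
      = (PySem.List.sorted (PySem.Set.ofList L) (fun x => x)).map
          (fun k => (k, (List.count k L : Int))) := by
  rw [PySem.Dict.items_counter]
  rw [pv_sorted2_eq_sorted_fst _ (by
    intro a ha b hb hfst
    simp only [List.mem_map] at ha hb
    obtain ⟨ka, _, rfl⟩ := ha
    obtain ⟨kb, _, rfl⟩ := hb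
    simp_all)]
  refine PySem.List.sorted_eq_of_perm_of_pairwise_lt _ _ _ ?_ ?_
  · exact List.Perm.map _ (PySem.List.sorted_perm _ _ _)
  · rw [List.pairwise_map]
    exact PySem.List.sorted_ofList_pairwise_lt L

-- count of an element in a flatMap of replicate-blocks over a nodup key list
theorem pv_count_flatMap (D : List String) (hnd : D.Nodup) (cnt : String → Nat) (a : String) :
    (D.flatMap (fun k => List.replicate (cnt k) k)).count a
      = if a ∈ D then cnt a else 0 := by
  induction D with
  | nil => simp
  | cons k ks ih =>
    simp only [List.flatMap_cons, List.count_append, List.count_replicate,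
      ih (List.nodup_cons.1 hnd).2, List.mem_cons]
    by_cases hak : a = k
    · subst hak
      simp [(List.nodup_cons.1 hnd).1]
    · simp [hak, Ne.symm hak, beq_iff_eq]

-- the flatMap of replicate-blocks is a permutation of the original list
theorem pv_flatMap_perm (L : List String) :
    ((PySem.List.sorted (PySem.Set.ofList L) (fun x => x)).flatMap
      (fun k => List.replicate (L.count k) k)).Perm L := by
  rw [List.perm_iff_count]
  intro a
  have hnd : (PySem.List.sorted (PySem.Set.ofList L) (fun x => x)).Nodup :=
    (PySem.List.sorted_ofList_pairwise_lt L).imp ne_of_lt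
  rw [pv_count_flatMap _ hnd]
  by_cases ha : a ∈ L
  · simp [PySem.List.mem_sorted, PySem.Set.mem_ofList, ha]
  · simp [PySem.List.mem_sorted, PySem.Set.mem_ofList, ha, List.count_eq_zero_of_not_mem ha]

-- the flatMap of replicate-blocks over a strictly increasing key list is sorted
theorem pv_flatMap_pairwise (D : List String) (h : D.Pairwise (· < ·)) (cnt : String → Nat) :
    (D.flatMap (fun k => List.replicate (cnt k) k)).Pairwise (· ≤ ·) := by
  induction D with
  | nil => simp
  | cons k ks ih =>
    simp only [List.flatMap_cons]
    rw [List.pairwise_append]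
    refine ⟨List.pairwise_replicate.2 (by simp), ih (List.pairwise_cons.1 h).2, ?_⟩
    intro x hx y hy
    obtain rfl := List.eq_of_mem_replicate hx
    obtain ⟨kk, hkk, hy'⟩ := List.mem_flatMap.1 hy
    obtain rfl := List.eq_of_mem_replicate hy'
    exact le_of_lt ((List.pairwise_cons.1 h).1 _ hkk)

-- sorted(statuses) decomposes into contiguous replicate-blocks over the sorted distinct statuses
theorem pv_sorted_eq_flatMap (L : List String) :
    PySem.List.sorted L (fun x => x)
      = (PySem.List.sorted (PySem.Set.ofList L) (fun x => x)).flatMap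
          (fun k => List.replicate (L.count k) k) := by
  exact PySem.List.sorted_id_eq_of_perm_of_pairwise _ _ (pv_flatMap_perm L)
    (pv_flatMap_pairwise _ (PySem.List.sorted_ofList_pairwise_lt L) _)

-- folding the scan over a run of the current key only increments the counter
theorem pv_fold_run (n : Nat) (parts : List String) (run : String) (c : Int) :
    (List.replicate n run).foldl pvStep (parts, run, c) = (parts, run, c + n) := by
  induction n generalizing c with
  | zero => simp
  | succ m ih =>
    rw [List.replicate_succ, List.foldl_cons]
    have hst : pvStep (parts, run, c) run = (parts, run, c + 1) := by simp [pvStep]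
    rw [hst, ih]
    simp only [Prod.mk.injEq, true_and]
    push_cast; ring

-- the run-length scan over the remaining blocks emits one part per distinct key
theorem pv_fold_blocks (D : List String) (cnt : String → Nat) :
    ∀ (parts : List String) (run : String) (c : Int),
    (∀ k ∈ D, 1 ≤ cnt k) → (∀ k ∈ D, k ≠ run) → D.Pairwise (· < ·) →
    (let fin := (D.flatMap (fun k => List.replicate (cnt k) k)).foldl pvStep (parts, run, c)
     fin.1 ++ [fin.2.1 ++ ": " ++ PySem.Int.toStr fin.2.2])
      = parts ++ [run ++ ": " ++ PySem.Int.toStr c]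
          ++ D.map (fun k => k ++ ": " ++ PySem.Int.toStr (cnt k : Int)) := by
  induction D with
  | nil => intro parts run c _ _ _; simp
  | cons k ks ih =>
    intro parts run c hpos hne hpw
    have hk1 : 1 ≤ cnt k := hpos k (by simp)
    have hrep : List.replicate (cnt k) k = k :: List.replicate (cnt k - 1) k := by
      cases h : cnt k with
      | zero => omega
      | succ m => simp [List.replicate_succ]
    simp only [List.flatMap_cons, List.foldl_append, hrep, List.foldl_cons]
    have hstep : pvStep (parts, run, c) k
        = (parts ++ [run ++ ": " ++ PySem.Int.toStr c], k, 1) := by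
      simp [pvStep, hne k (by simp)]
    rw [hstep, pv_fold_run]
    have hc : (1 : Int) + (cnt k - 1 : Nat) = (cnt k : Int) := by omega
    rw [hc]
    have := ih (parts ++ [run ++ ": " ++ PySem.Int.toStr c]) k (cnt k)
      (fun x hx => hpos x (by simp [hx]))
      (fun x hx => ne_of_gt ((List.pairwise_cons.1 hpw).1 x hx))
      (List.pairwise_cons.1 hpw).2
    simp only at this ⊢
    rw [this]
    simp

-- ===== VERDICT (by name: the statement is the Claim_ definition above) =====
theorem format_status_summary_spec : Claim_equal_format_status_summary := by
  intro videos _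
  unfold Spec_format_status_summary format_status_summary format_status_summary_alt
  by_cases hnil : videos = []
  · simp [hnil]
  · simp only [if_neg hnil]
    set L := videos.map pvNorm with hL
    have hfold : videos.foldl
        (fun d video => let status := pvNorm video; d.insert status (d.getD status 0 + 1))
        PySem.Dict.empty
        = PySem.Dict.counter L := by
      rw [← PySem.Dict.foldl_insert_getD_add_one_eq_counter, hL, List.foldl_map]
    rw [hfold, pv_sorted_items, List.map_map]
    -- the B side: decompose the sorted status list into blocks
    set D := PySem.List.sorted (PySem.Set.ofList L) (fun x => x) with hD
    have hS : PySem.List.sorted L (fun x => x)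
        = D.flatMap (fun k => List.replicate (L.count k) k) := pv_sorted_eq_flatMap L
    have hLne : L ≠ [] := by
      simp [hL, List.map_eq_nil_iff, hnil]
    have hDne : D ≠ [] := by
      intro h
      have hperm := PySem.List.sorted_perm (PySem.Set.ofList L) (fun x => x) false
      rw [← hD, h] at hperm
      have hset : PySem.Set.ofList L = [] := hperm.symm.eq_nil
      obtain ⟨a, t, hLc⟩ := List.exists_cons_of_ne_nil hLne
      have ham : a ∈ PySem.Set.ofList L := (PySem.Set.mem_ofList _ _).2 (by rw [hLc]; simp)
      rw [hset] at ham; cases ham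
    obtain ⟨d0, ds, hDeq⟩ := List.exists_cons_of_ne_nil hDne
    have hpw := PySem.List.sorted_ofList_pairwise_lt L
    rw [← hD, hDeq] at hpw
    have hpos : ∀ k ∈ D, 1 ≤ L.count k := by
      intro k hk
      have : k ∈ L := by
        rw [hD, PySem.List.mem_sorted, PySem.Set.mem_ofList] at hk; exact hk
      exact List.count_pos_iff.2 this
    have hd0pos : 1 ≤ L.count d0 := hpos d0 (by rw [hDeq]; simp)
    have hScons : PySem.List.sorted L (fun x => x)
        = d0 :: (List.replicate (L.count d0 - 1) d0 ++ ds.flatMap (fun k => List.replicate (L.count k) k)) := by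
      rw [hS, hDeq, List.flatMap_cons]
      cases h : L.count d0 with
      | zero => omega
      | succ m => simp [List.replicate_succ]
    rw [hScons]
    simp only [List.foldl_cons, List.foldl_append]
    have hstep0 : pvStep ([], d0, 0) d0 = ([], d0, 1) := by simp [pvStep]
    rw [hstep0, pv_fold_run]
    have hc : (1 : Int) + (L.count d0 - 1 : Nat) = (L.count d0 : Int) := by omega
    rw [hc]
    have hblocks := pv_fold_blocks ds (fun k => L.count k) [] d0 (L.count d0)
      (fun x hx => hpos x (by rw [hDeq]; simp [hx]))
      (fun x hx => ne_of_gt ((List.pairwise_cons.1 hpw).1 x hx))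
      (List.pairwise_cons.1 hpw).2
    simp only at hblocks ⊢
    rw [hblocks, hDeq]
    simp [Function.comp_def]
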